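-- pv_equiv track=rewrite | github.com/bibacrm/ocap_analyzer | utils/utils.py | get_player_squad_name
-- ===== SOURCE A (Python) =====
-- def get_player_squad_name(player_name):
--     # Squad tag parsing logic for a main pattern "[<Squad>]<Player>", "~" is for recruits specific players on RBC
--     # '=]B[=', 'Dw.', 'St.', 'UN' - specific non-pattern squad titles
--     if '=]B[=' in player_name:
--         squad_name = 'B'
--     elif any(i in player_name for i in ["=UN=", '-UN-', '|UN|', '[UN]']):
--         squad_name = 'UN'
--     elif 'Dw.' in player_name:
--         squad_name = 'Dw'
--     elif 'St.' in player_name: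
--         squad_name = 'St'
--     elif "[" in player_name and "]" in player_name:
--         squad_name = player_name.split("[")[1].split("]")[0].strip('~')
--     else:
--         squad_name = None
--     return squad_name
-- ===== SOURCE B (Python) =====
-- def get_player_squad_name(player_name):
--     # Table of (patterns, tag) rules in priority order; first match wins.
--     rules = [(('=]B[=',), 'B'),
--              (('=UN=', '-UN-', '|UN|', '[UN]'), 'UN'),
--              (('Dw.',), 'Dw'),
--              (('St.',), 'St')]
--     for patterns, tag in rules:
--         if any(p in player_name for p in patterns):
--             return tag
--     if '[' in player_name and ']' in player_name:
--         # single scan: skip to the first '[', then collect until '[' or ']'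
--         tag_chars = []
--         collecting = False
--         for ch in player_name:
--             if not collecting:
--                 collecting = ch == '['
--             elif ch in '[]':
--                 break
--             else:
--                 tag_chars.append(ch)
--         return ''.join(tag_chars).strip('~')
--     return None
-- ===== Notes on version B (the rewrite author's own statement) =====
-- stated objective: idiomatic
-- what changed: The if/elif chain becomes a table of (patterns, tag) rules scanned for the first match, and the bracket case replaces the double split-and-index with a single character scan that skips to the first '[' and collects until the next '[' or ']'.
import Mathlib
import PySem

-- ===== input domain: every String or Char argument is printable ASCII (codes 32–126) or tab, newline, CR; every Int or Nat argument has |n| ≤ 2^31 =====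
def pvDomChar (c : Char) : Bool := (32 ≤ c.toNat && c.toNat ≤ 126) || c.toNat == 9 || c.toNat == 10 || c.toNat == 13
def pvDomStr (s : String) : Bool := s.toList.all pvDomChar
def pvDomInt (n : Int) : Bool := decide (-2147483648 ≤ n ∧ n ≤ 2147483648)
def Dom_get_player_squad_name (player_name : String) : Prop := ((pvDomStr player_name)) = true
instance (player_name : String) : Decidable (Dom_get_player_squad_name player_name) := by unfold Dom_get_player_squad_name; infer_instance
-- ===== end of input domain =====

-- B replaces the if/elif chain by a rules table scanned for the first match and the
-- double split-and-index by a single character scan (idiomatic; same cost).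

-- ===== PORT A =====
-- A's expression player_name.split("[")[1].split("]")[0].strip('~'):
-- split(sep) = PySem.Str.split?, [i] = PySem.List.pyGet?
-- (the none branches are Python's would-be IndexError/empty-sep, unreachable here)
def pvABracket (player_name : String) : Option String :=
  match PySem.Str.split? player_name "[" with
  | none => none
  | some parts =>
    match PySem.List.pyGet? parts 1 with
    | none => none
    | some mid =>
      match PySem.Str.split? mid "]" with
      | none => none
      | some parts2 =>
        match PySem.List.pyGet? parts2 0 with
        | none => none
        | some hd => some (PySem.Str.stripChars hd "~")

-- literal transliteration of A's if/elif chain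
def get_player_squad_name (player_name : String) : Option String :=
  if PySem.Str.isIn "=]B[=" player_name then some "B"
  else if ["=UN=", "-UN-", "|UN|", "[UN]"].any (fun i => PySem.Str.isIn i player_name) then some "UN"
  else if PySem.Str.isIn "Dw." player_name then some "Dw"
  else if PySem.Str.isIn "St." player_name then some "St"
  else if PySem.Str.isIn "[" player_name && PySem.Str.isIn "]" player_name then
    pvABracket player_name
  else none

-- ===== PORT B =====
-- the rules table of B
def pvRules : List (List String × String) :=
  [(["=]B[="], "B"), (["=UN=", "-UN-", "|UN|", "[UN]"], "UN"), (["Dw."], "Dw"), (["St."], "St")]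

-- B's single scan: skip until the first '[' (collecting = false), then collect
-- characters until '[' or ']' (the Python loop's break = returning the accumulator)
def pvCollectTag : List Char → Bool → List Char → List Char
  | [], _, acc => acc.reverse
  | ch :: rest, false, acc => pvCollectTag rest (ch == '[') acc
  | ch :: rest, true, acc =>
    if ch = '[' ∨ ch = ']' then acc.reverse else pvCollectTag rest true (ch :: acc)

def get_player_squad_name_alt (player_name : String) : Option String :=
  match pvRules.find? (fun r => r.1.any (fun p => PySem.Str.isIn p player_name)) with
  | some r => some r.2
  | none =>
    if PySem.Str.isIn "[" player_name && PySem.Str.isIn "]" player_name then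
      some (PySem.Str.stripChars (String.ofList (pvCollectTag player_name.toList false [])) "~")
    else none

-- ===== PRECONDITION & SPEC =====
def Spec_get_player_squad_name (player_name : String) (out : Option String) : Prop := out = get_player_squad_name_alt player_name
instance (player_name : String) (out : Option String) : Decidable (Spec_get_player_squad_name player_name out) := by unfold Spec_get_player_squad_name; infer_instance

-- ===== CLAIM (what is proved, stated in full; the proofs are below) =====
def Claim_equal_get_player_squad_name : Prop := ∀ (player_name : String), Dom_get_player_squad_name player_name → Spec_get_player_squad_name player_name (get_player_squad_name player_name)

-- ===== LEMMAS AND PROOFS =====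

-- reference version of Python's str.split with a one-character separator
def pvSplitc (c : Char) : List Char → List (List Char)
  | [] => [[]]
  | a :: rest => if a = c then [] :: pvSplitc c rest
      else (pvSplitc c rest).modifyHead (a :: ·)

lemma pvSplitc_ne_nil (c : Char) (l : List Char) : pvSplitc c l ≠ [] := by
  induction l with
  | nil => simp [pvSplitc]
  | cons a rest ih =>
    simp only [pvSplitc]
    split
    · simp
    · cases h : pvSplitc c rest with
      | nil => exact absurd h ih
      | cons x xs => simp [List.modifyHead]

lemma pvGo_eq (c : Char) : ∀ (fuel : Nat) (l cur : List Char) (acc : List (List Char)),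
    l.length < fuel →
    PySem.Chars.splitOn.go [c] fuel l cur acc
      = acc.reverse ++ (pvSplitc c l).modifyHead (cur.reverse ++ ·) := by
  intro fuel
  induction fuel with
  | zero => intro l cur acc h; omega
  | succ fuel ih =>
    intro l cur acc h
    cases l with
    | nil =>
      rw [PySem.Chars.splitOn.go.eq_def]
      simp [pvSplitc, List.modifyHead]
    | cons a rest =>
      by_cases hac : a = c
      · subst hac
        have hpre : [a].isPrefixOf (a :: rest) = true := by simp [List.isPrefixOf]
        rw [PySem.Chars.splitOn.go.eq_def]
        simp only [hpre, if_true, List.drop_succ_cons, List.length_nil, List.drop_zero, List.length_cons]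
        rw [ih rest [] (cur.reverse :: acc) (Nat.lt_of_succ_lt_succ h)]
        simp [pvSplitc, List.modifyHead]
        cases pvSplitc a rest <;> rfl
      · have hpre : [c].isPrefixOf (a :: rest) = false := by
          simp [List.isPrefixOf]
          exact fun hh => absurd hh.symm hac
        rw [PySem.Chars.splitOn.go.eq_def]
        simp only [hpre, Bool.false_eq_true, if_false]
        rw [ih rest (a :: cur) acc (Nat.lt_of_succ_lt_succ h)]
        have hne : pvSplitc c rest ≠ [] := pvSplitc_ne_nil c rest
        cases hsp : pvSplitc c rest with
        | nil => exact absurd hsp hne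
        | cons x xs =>
          simp [pvSplitc, hac, hsp, List.modifyHead]

lemma pvSplitOn_eq (c : Char) (l : List Char) :
    PySem.Chars.splitOn l [c] = pvSplitc c l := by
  have h := pvGo_eq c (l.length + 1) l [] [] (Nat.lt_succ_self _)
  rw [PySem.Chars.splitOn, h]
  have hne := pvSplitc_ne_nil c l
  cases hsp : pvSplitc c l with
  | nil => exact absurd hsp hne
  | cons x xs => simp [List.modifyHead]

lemma pvSplitc_head? (c : Char) (l : List Char) :
    (pvSplitc c l).head? = some (l.takeWhile (· ≠ c)) := by
  induction l with
  | nil => simp [pvSplitc]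
  | cons a rest ih =>
    by_cases hac : a = c
    · subst hac; simp [pvSplitc, List.takeWhile]
    · simp [pvSplitc, hac, List.head?_modifyHead, ih]

lemma pvSplitc_mem (c : Char) (l : List Char) (h : c ∈ l) :
    pvSplitc c l = (l.takeWhile (· ≠ c)) :: pvSplitc c ((l.dropWhile (· ≠ c)).tail) := by
  induction l with
  | nil => cases h
  | cons a rest ih =>
    by_cases hac : a = c
    · subst hac; simp [pvSplitc]
    · have hc : c ∈ rest := by cases h with
        | head => exact absurd rfl hac
        | tail _ hm => exact hm
      simp only [pvSplitc, hac, if_false]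
      rw [ih hc]
      simp [hac, List.modifyHead]

-- B's scan, collecting phase
lemma pvCollectTag_true (l : List Char) : ∀ acc,
    pvCollectTag l true acc = acc.reverse ++ l.takeWhile (fun ch => !decide (ch = '[' ∨ ch = ']')) := by
  induction l with
  | nil => intro acc; simp [pvCollectTag]
  | cons a rest ih =>
    intro acc
    by_cases h : a = '[' ∨ a = ']'
    · simp only [pvCollectTag]
      rw [if_pos h, List.takeWhile_cons]
      simp [h]
    · simp only [pvCollectTag]
      rw [if_neg h, ih (a :: acc), List.takeWhile_cons]
      simp [h]

-- B's scan, skipping phase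
lemma pvCollectTag_false (l : List Char) (h : '[' ∈ l) :
    pvCollectTag l false [] = ((l.dropWhile (· ≠ '[')).tail).takeWhile (fun ch => !decide (ch = '[' ∨ ch = ']')) := by
  induction l with
  | nil => cases h
  | cons a rest ih =>
    by_cases hac : a = '['
    · subst hac
      simp only [pvCollectTag, beq_self_eq_true]
      rw [pvCollectTag_true rest []]
      simp
    · have hc : '[' ∈ rest := by cases h with
        | head => exact absurd rfl hac
        | tail _ hm => exact hm
      have hb : (a == '[') = false := by simpa using hac
      simp only [pvCollectTag, hb]
      rw [ih hc]
      simp [hac]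

lemma pvMem_of_isIn (c : Char) (cs : String) (s : String)
    (hcs : cs.toList = [c]) (h : PySem.Str.isIn cs s = true) : c ∈ s.toList := by
  have hinf := (PySem.Str.isIn_iff_infix cs s).mp h
  rw [hcs] at hinf
  exact hinf.subset (List.mem_singleton_self _)

lemma pvPyGet1 (xs : List String) : PySem.List.pyGet? xs 1 = xs[1]? := by
  have h : (1 : Int) = ((1 : Nat) : Int) := by norm_num
  rw [h, PySem.List.pyGet?_natCast]

lemma pvPyGet0 (xs : List String) : PySem.List.pyGet? xs 0 = xs[0]? := by
  have h : (0 : Int) = ((0 : Nat) : Int) := by norm_num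
  rw [h, PySem.List.pyGet?_natCast]

-- the bracket branch of A equals the scan of B
lemma pvBracket_eq (s : String) (hl : PySem.Str.isIn "[" s = true) :
    pvABracket s
      = some (PySem.Str.stripChars (String.ofList (pvCollectTag s.toList false [])) "~") := by
  have hmem : '[' ∈ s.toList := pvMem_of_isIn '[' "[" s rfl hl
  set r : List Char := (s.toList.dropWhile (· ≠ '[')).tail with hr
  have h1 : PySem.Str.split? s "[" =
      some (List.map String.ofList (pvSplitc '[' s.toList)) := by
    rw [PySem.Str.split?.eq_1]
    have hc : PySem.Chars.split? s.toList "[".toList = some (pvSplitc '[' s.toList) := by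
      rw [show "[".toList = ['['] from rfl, PySem.Chars.split?]
      simp [pvSplitOn_eq]
    rw [hc, Option.map_some]
  have h2 : pvSplitc '[' s.toList = (s.toList.takeWhile (· ≠ '[')) :: pvSplitc '[' r :=
    pvSplitc_mem '[' s.toList hmem
  have h3 : (List.map String.ofList (pvSplitc '[' s.toList))[1]? =
      some (String.ofList (r.takeWhile (· ≠ '['))) := by
    rw [h2]
    have hx := pvSplitc_head? '[' r
    cases h4 : pvSplitc '[' r with
    | nil => exact absurd h4 (pvSplitc_ne_nil '[' r)
    | cons x xs =>
      rw [h4] at hx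
      simp only [List.head?_cons, Option.some.injEq] at hx
      simp [hx]
  set mid : List Char := r.takeWhile (· ≠ '[') with hmid
  have h5 : PySem.Str.split? (String.ofList mid) "]" =
      some (List.map String.ofList (pvSplitc ']' mid)) := by
    rw [PySem.Str.split?.eq_1]
    have hc : PySem.Chars.split? (String.ofList mid).toList "]".toList = some (pvSplitc ']' mid) := by
      rw [show "]".toList = [']'] from rfl, PySem.Chars.split?, String.toList_ofList]
      simp [pvSplitOn_eq]
    rw [hc, Option.map_some]
  have h6 : (List.map String.ofList (pvSplitc ']' mid))[0]? =
      some (String.ofList (mid.takeWhile (· ≠ ']'))) := by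
    have hx := pvSplitc_head? ']' mid
    cases h4 : pvSplitc ']' mid with
    | nil => exact absurd h4 (pvSplitc_ne_nil ']' mid)
    | cons x xs =>
      rw [h4] at hx
      simp only [List.head?_cons, Option.some.injEq] at hx
      simp [hx]
  have hlists : mid.takeWhile (· ≠ ']') = pvCollectTag s.toList false [] := by
    rw [pvCollectTag_false s.toList hmem, hmid, ← hr, List.takeWhile_takeWhile]
    congr 1
    funext a
    by_cases ha1 : a = '[' <;> by_cases ha2 : a = ']' <;> simp [ha1, ha2]
  unfold pvABracket
  simp only [h1]
  simp only [pvPyGet1, h3]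
  simp only [h5]
  simp only [pvPyGet0, h6]
  rw [hlists]

-- ===== VERDICT (by name: the statement is the Claim_ definition above) =====
theorem get_player_squad_name_spec : Claim_equal_get_player_squad_name := by
  intro pn _
  unfold Spec_get_player_squad_name
  by_cases h1 : PySem.Chars.isIn ['=', ']', 'B', '[', '='] pn.toList = true
  · simp [get_player_squad_name, get_player_squad_name_alt, pvRules, h1]
  · by_cases h2a : PySem.Chars.isIn ['=', 'U', 'N', '='] pn.toList = true
    · simp [get_player_squad_name, get_player_squad_name_alt, pvRules, h1, h2a]
    · by_cases h2b : PySem.Chars.isIn ['-', 'U', 'N', '-'] pn.toList = true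
      · simp [get_player_squad_name, get_player_squad_name_alt, pvRules, h1, h2a, h2b]
      · by_cases h2c : PySem.Chars.isIn ['|', 'U', 'N', '|'] pn.toList = true
        · simp [get_player_squad_name, get_player_squad_name_alt, pvRules, h1, h2a, h2b, h2c]
        · by_cases h2d : PySem.Chars.isIn ['[', 'U', 'N', ']'] pn.toList = true
          · simp [get_player_squad_name, get_player_squad_name_alt, pvRules, h1, h2a, h2b, h2c, h2d]
          · by_cases h3 : PySem.Chars.isIn ['D', 'w', '.'] pn.toList = true
            · simp [get_player_squad_name, get_player_squad_name_alt, pvRules, h1, h2a, h2b, h2c, h2d, h3]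
            · by_cases h4 : PySem.Chars.isIn ['S', 't', '.'] pn.toList = true
              · simp [get_player_squad_name, get_player_squad_name_alt, pvRules, h1, h2a, h2b, h2c, h2d, h3, h4]
              · by_cases hb1 : PySem.Chars.isIn ['['] pn.toList = true
                · by_cases hb2 : PySem.Chars.isIn [']'] pn.toList = true
                  · have hb := pvBracket_eq pn (by simpa using hb1)
                    simp [get_player_squad_name, get_player_squad_name_alt, pvRules,
                      h1, h2a, h2b, h2c, h2d, h3, h4, hb1, hb2, hb]
                  · simp [get_player_squad_name, get_player_squad_name_alt, pvRules,
                      h1, h2a, h2b, h2c, h2d, h3, h4, hb1, hb2]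
                · simp [get_player_squad_name, get_player_squad_name_alt, pvRules,
                    h1, h2a, h2b, h2c, h2d, h3, h4, hb1]
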